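-- pv_equiv track=rewrite | github.com/Capstone-2-FMSuggestion-System/model_service | nutrition_service/src/helper.py | get_matching_ingredient
-- ===== SOURCE A (Python) =====
-- from typing import Dict, List, Any, Optional
--
-- def get_matching_ingredient(query: str, ingredients_list: List[str]) -> Optional[str]:
--     """
--     Find the most relevant matching ingredient from a list.
--
--     Args:
--         query: Ingredient to search for
--         ingredients_list: List of ingredients to search in
--
--     Returns:
--         Best matching ingredient or None if no good match
--     """
--     query = query.lower()
--
--     # Direct match
--     for ingredient in ingredients_list:
--         if query == ingredient.lower():
--             return ingredient
--
--     # Partial match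
--     matches = []
--     for ingredient in ingredients_list:
--         if query in ingredient.lower() or ingredient.lower() in query:
--             matches.append((ingredient, len(ingredient)))
--
--     # Sort by length (shorter matches are usually more accurate)
--     if matches:
--         matches.sort(key=lambda x: x[1])
--         return matches[0][0]
--
--     return None
-- ===== SOURCE B (Python) =====
-- def get_matching_ingredient(query, ingredients_list):
--     # Single pass: return the first exact (case-insensitive) match immediately;
--     # otherwise keep the first-encountered shortest partial match.
--     q = query.lower()
--     best = None
--     for ingredient in ingredients_list:
--         low = ingredient.lower()
--         if low == q:
--             return ingredient
--         if q in low or low in q: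
--             if best is None or len(ingredient) < len(best):
--                 best = ingredient
--     return best
-- ===== Notes on version B (the rewrite author's own statement) =====
-- stated objective: alternative
-- what changed: Replaced A's two full passes (exact-match scan, then collect all partial matches and stable-sort them by length to take the head) by a single loop that returns the first exact match immediately and otherwise maintains a running shortest partial match with strict '<' to preserve the first-tie behaviour.
import Mathlib
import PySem

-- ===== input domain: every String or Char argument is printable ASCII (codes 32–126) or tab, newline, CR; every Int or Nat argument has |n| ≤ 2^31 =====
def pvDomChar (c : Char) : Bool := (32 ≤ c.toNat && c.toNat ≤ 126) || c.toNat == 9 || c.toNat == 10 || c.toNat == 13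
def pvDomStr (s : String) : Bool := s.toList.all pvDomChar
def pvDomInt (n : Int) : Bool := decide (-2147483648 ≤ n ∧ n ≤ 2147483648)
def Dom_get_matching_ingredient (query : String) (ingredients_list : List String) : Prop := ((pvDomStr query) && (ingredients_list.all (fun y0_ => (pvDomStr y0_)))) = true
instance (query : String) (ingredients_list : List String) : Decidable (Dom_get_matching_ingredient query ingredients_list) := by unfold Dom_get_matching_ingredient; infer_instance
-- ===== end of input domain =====

-- B fuses A's two passes + sort into one loop: first exact match returns at once,
-- otherwise a running shortest partial match (strict '<' keeps the first tie).


-- ===== PORT A =====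
-- A's first loop: 'for ingredient in ingredients_list: if query == ingredient.lower(): return ingredient'
def aDirect (q : String) : List String → Option String
  | [] => none
  | ing :: rest => if q == PySem.Str.lower ing then some ing else aDirect q rest

def get_matching_ingredient (query : String) (ingredients_list : List String) : Option String :=
  let q := PySem.Str.lower query
  match aDirect q ingredients_list with
  | some r => some r
  | none =>
    -- second loop: collect (ingredient, len(ingredient)) for partial matches
    let ms := ingredients_list.foldl (fun acc ing =>
      if PySem.Str.isIn q (PySem.Str.lower ing) || PySem.Str.isIn (PySem.Str.lower ing) q
      then acc ++ [(ing, PySem.Str.len ing)] else acc) []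
    if ms = [] then none
    else
      -- matches.sort(key=lambda x: x[1]); return matches[0][0]
      match PySem.List.pyGet? (PySem.List.sorted ms (fun x => x.2) false) 0 with
      | some p => some p.1
      | none => none

-- ===== PORT B =====
def bLoop (q : String) : List String → Option String → Option String
  | [], best => best
  | ing :: rest, best =>
    let low := PySem.Str.lower ing
    if low == q then some ing
    else if PySem.Str.isIn q low || PySem.Str.isIn low q then
      match best with
      | none => bLoop q rest (some ing)
      | some b =>
        if PySem.Str.len ing < PySem.Str.len b then bLoop q rest (some ing)
        else bLoop q rest (some b)
    else bLoop q rest best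

def get_matching_ingredient_alt (query : String) (ingredients_list : List String) : Option String :=
  bLoop (PySem.Str.lower query) ingredients_list none

-- ===== PRECONDITION & SPEC =====
def Spec_get_matching_ingredient (query : String) (ingredients_list : List String) (out : Option String) : Prop := out = get_matching_ingredient_alt query ingredients_list
instance (query : String) (ingredients_list : List String) (out : Option String) : Decidable (Spec_get_matching_ingredient query ingredients_list out) := by unfold Spec_get_matching_ingredient; infer_instance

-- ===== CLAIM (what is proved, stated in full; the proofs are below) =====
def Claim_equal_get_matching_ingredient : Prop := ∀ (query : String) (ingredients_list : List String), Dom_get_matching_ingredient query ingredients_list → Spec_get_matching_ingredient query ingredients_list (get_matching_ingredient query ingredients_list)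

-- ===== LEMMAS AND PROOFS =====

-- the running strict-minimum loop, the common shape of B's partial-match accumulator
def runMin {α : Type} (key : α → Int) : List α → Option α → Option α
  | [], b => b
  | x :: xs, b =>
    match b with
    | none => runMin key xs (some x)
    | some m => if key x < key m then runMin key xs (some x) else runMin key xs (some m)

-- head of an insertion step
theorem head?_insertBy {α : Type} (bef : α → α → Bool) (x : α) (acc : List α) :
    (PySem.List.insertBy bef x acc).head? =
      match acc.head? with
      | none => some x
      | some y => if bef x y then some x else some y := by
  cases acc with
  | nil => simp [PySem.List.insertBy]
  | cons y ys => simp [PySem.List.insertBy]; split <;> simp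

-- head of the insertion-sort foldl is the running strict-minimum
theorem head?_foldl_insertBy {α : Type} (key : α → Int) :
    ∀ (ms : List α) (acc : List α),
      (ms.foldl (fun a x => PySem.List.insertBy (fun a b => decide (key a < key b)) x a) acc).head?
        = runMin key ms acc.head? := by
  intro ms
  induction ms with
  | nil => intro acc; simp [runMin]
  | cons x rest ih =>
    intro acc
    simp only [List.foldl_cons]
    rw [ih]
    cases h : acc.head? with
    | none =>
      have : (PySem.List.insertBy (fun a b => decide (key a < key b)) x acc).head? = some x := by
        rw [head?_insertBy, h]
      simp [this, runMin]
    | some y =>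
      have : (PySem.List.insertBy (fun a b => decide (key a < key b)) x acc).head?
          = if key x < key y then some x else some y := by
        rw [head?_insertBy, h]; split <;> simp_all
      rw [this]
      simp only [runMin, h]
      split <;> rfl

theorem sorted_false_eq {α : Type} (ms : List α) (key : α → Int) :
    PySem.List.sorted ms key false
      = ms.foldl (fun a x => PySem.List.insertBy (fun a b => decide (key a < key b)) x a) [] := rfl

theorem pyGet?_zero {α : Type} (l : List α) : PySem.List.pyGet? l 0 = l.head? := by
  cases l <;> simp [PySem.List.pyGet?, PySem.List.pyIdx?]

-- runMin commutes with mapping each string to its (string, length) pair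
theorem runMin_map_pair :
    ∀ (xs : List String) (b : Option String),
      runMin (fun p => p.2) (xs.map (fun i => (i, PySem.Str.len i))) (b.map (fun i => (i, PySem.Str.len i)))
        = (runMin PySem.Str.len xs b).map (fun i => (i, PySem.Str.len i)) := by
  intro xs
  induction xs with
  | nil => intro b; simp [runMin]
  | cons x rest ih =>
    intro b
    cases b with
    | none => simpa [runMin] using ih (some x)
    | some m =>
      simp only [List.map_cons, Option.map_some, runMin]
      split_ifs with h1 h2 h2 <;>
        first
          | simpa using ih (some x)
          | simpa using ih (some m)
          | (exfalso; revert h1 h2; simp [PySem.Str.len])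

-- if some ingredient matches exactly, both sides return the first such ingredient
theorem bLoop_of_exact (q : String) :
    ∀ (xs : List String) (r : String), aDirect q xs = some r →
      ∀ (best : Option String), bLoop q xs best = some r := by
  intro xs
  induction xs with
  | nil => intro r h; simp [aDirect] at h
  | cons x rest ih =>
    intro r h best
    by_cases hx : q == PySem.Str.lower x
    · simp [aDirect, hx] at h
      subst h
      have hx2 : (PySem.Str.lower x == q) = true := beq_iff_eq.mpr (beq_iff_eq.mp hx).symm
      simp [bLoop, hx2]
    · simp [aDirect, hx] at h
      have hx' : (PySem.Str.lower x == q) = false := by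
        apply beq_eq_false_iff_ne.mpr
        intro e
        exact hx (beq_iff_eq.mpr e.symm)
      simp only [bLoop, hx', Bool.false_eq_true, if_false]
      split
      · cases best <;> simp [ih r h]
      · exact ih r h _

-- with no exact match, B's loop is the running minimum over the partial matchers
theorem bLoop_no_exact (q : String) :
    ∀ (xs : List String), aDirect q xs = none →
      ∀ (best : Option String),
        bLoop q xs best
          = runMin PySem.Str.len
              (xs.filter (fun ing => PySem.Str.isIn q (PySem.Str.lower ing) || PySem.Str.isIn (PySem.Str.lower ing) q)) best := by
  intro xs
  induction xs with
  | nil => intro _ best; simp [bLoop, runMin]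
  | cons x rest ih =>
    intro h best
    by_cases hx : q == PySem.Str.lower x
    · simp [aDirect, hx] at h
    · simp [aDirect, hx] at h
      have hx' : (PySem.Str.lower x == q) = false := by
        apply beq_eq_false_iff_ne.mpr
        intro e
        exact hx (beq_iff_eq.mpr e.symm)
      simp only [bLoop, hx', Bool.false_eq_true, if_false, List.filter_cons]
      by_cases hp : (PySem.Str.isIn q (PySem.Str.lower x) || PySem.Str.isIn (PySem.Str.lower x) q) = true
      · simp only [hp, if_true]
        cases best with
        | none => simp [runMin, ih h]
        | some m =>
          simp only [runMin]
          by_cases hl : x.length < m.length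
          · simp [hl, ih h]
          · simp [hl, ih h]
      · simp only [hp, if_false, Bool.false_eq_true]
        exact ih h best

-- ===== VERDICT (by name: the statement is the Claim_ definition above) =====
theorem get_matching_ingredient_spec : Claim_equal_get_matching_ingredient := by
  intro query lst _
  unfold Spec_get_matching_ingredient get_matching_ingredient get_matching_ingredient_alt
  set q := PySem.Str.lower query with hq
  cases hd : aDirect q lst with
  | some r => simp [hd, bLoop_of_exact q lst r hd none]
  | none =>
    simp only
    rw [PySem.List.foldl_append_if
      (p := fun ing => PySem.Str.isIn q (PySem.Str.lower ing) || PySem.Str.isIn (PySem.Str.lower ing) q)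
      (f := fun ing => (ing, PySem.Str.len ing))]
    rw [bLoop_no_exact q lst hd none]
    set flt := lst.filter (fun ing => PySem.Str.isIn q (PySem.Str.lower ing) || PySem.Str.isIn (PySem.Str.lower ing) q) with hflt
    simp only [List.nil_append]
    by_cases hnil : flt.map (fun ing => (ing, PySem.Str.len ing)) = []
    · have hfe : flt = [] := List.map_eq_nil_iff.mp hnil
      simp [hd, hfe, runMin]
    · simp only [hd, hnil, if_false]
      rw [pyGet?_zero, sorted_false_eq, head?_foldl_insertBy]
      show (match runMin (fun p => (p : String × Int).2) (flt.map fun i => (i, PySem.Str.len i))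
              (Option.map (fun i => (i, PySem.Str.len i)) none) with
            | some p => some p.1
            | none => none) = runMin PySem.Str.len flt none
      rw [runMin_map_pair flt none]
      cases runMin PySem.Str.len flt none <;> simp
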